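-- pv_equiv track=rewrite | github.com/RenanLeviathan-zz/knn | src/knn.py | maximo
-- ===== SOURCE A (Python) =====
-- def maximo(instances):
--     m=0
--     maxim=[]
--     length = len(instances[0])-1
--     for j in range(0,length):
--         for i in range(0,len(instances)):
--             if i>0:
--                 if instances[i][j] > m:m=instances[i][j]
--             else:
--                m=instances[i][j]
--         maxim.append(m)
--     return maxim
-- ===== SOURCE B (Python) =====
-- def maximo(instances):
--     acc = list(instances[0][:len(instances[0]) - 1])
--     for row in instances[1:]:
--         acc = [x if x > y else y for x, y in zip(acc, row)]
--     return acc
-- ===== Notes on version B (the rewrite author's own statement) =====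
-- stated objective: alternative
-- what changed: A scans column-major with nested loops and a scalar running max per column; B makes a single row-major pass, folding each row into a vector accumulator of per-column maxima (elementwise max via zip), seeded with the truncated first row.
import Mathlib
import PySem

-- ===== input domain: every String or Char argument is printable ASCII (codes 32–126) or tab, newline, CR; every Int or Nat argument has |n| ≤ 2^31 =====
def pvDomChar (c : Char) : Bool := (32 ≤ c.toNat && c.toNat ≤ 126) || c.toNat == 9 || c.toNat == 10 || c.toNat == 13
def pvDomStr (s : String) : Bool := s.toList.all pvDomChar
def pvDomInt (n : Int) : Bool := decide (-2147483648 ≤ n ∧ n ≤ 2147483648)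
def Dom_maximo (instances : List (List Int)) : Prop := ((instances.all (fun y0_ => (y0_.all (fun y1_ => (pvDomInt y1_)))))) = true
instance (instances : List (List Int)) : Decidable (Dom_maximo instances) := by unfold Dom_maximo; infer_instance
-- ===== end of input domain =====

-- B replaces A's column-major nested loops (scalar running max per column) by a single row-major
-- pass folding each row into a vector accumulator of per-column maxima; same cost, alternative traversal.


-- ===== PORT A =====
def maximo (instances : List (List Int)) : List Int :=
  let length : Int := ((PySem.List.pyGetD instances 0 []).length : Int) - 1
  ((PySem.List.pyRange 0 length 1).foldl (fun (st : Int × List Int) j =>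
      let m := (PySem.List.pyRange 0 (instances.length : Int) 1).foldl (fun m i =>
          if i > 0 then
            (if PySem.List.pyGetD (PySem.List.pyGetD instances i []) j 0 > m then
               PySem.List.pyGetD (PySem.List.pyGetD instances i []) j 0
             else m)
          else PySem.List.pyGetD (PySem.List.pyGetD instances i []) j 0) st.1
      (m, st.2 ++ [m])) ((0 : Int), ([] : List Int))).2

-- ===== PORT B =====
-- single pass over the rows; acc holds the running per-column maxima of the first len-1 columns
def maximo_alt (instances : List (List Int)) : List Int :=
  let r0 := PySem.List.pyGetD instances 0 []
  let acc0 := PySem.List.slice r0 none (some ((r0.length : Int) - 1))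
  (PySem.List.slice instances (some 1) none).foldl
    (fun acc row => (acc.zip row).map (fun p => if p.1 > p.2 then p.1 else p.2)) acc0

-- ===== PRECONDITION & SPEC =====
-- Pre_ excludes exactly the inputs where A raises IndexError: the empty list (instances[0])
-- and ragged inputs with a row shorter than len(instances[0])-1 (the inner-loop access).
def Pre_maximo (instances : List (List Int)) : Prop :=
  instances ≠ [] ∧ ∀ r ∈ instances, (instances.headD []).length - 1 ≤ r.length
instance (instances : List (List Int)) : Decidable (Pre_maximo instances) := by
  unfold Pre_maximo; infer_instance
def pvWitness_maximo : List (List Int) := [[1, 5, 2], [4, 0, 7]]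

def Spec_maximo (instances : List (List Int)) (out : List Int) : Prop := out = maximo_alt instances
instance (instances : List (List Int)) (out : List Int) : Decidable (Spec_maximo instances out) := by unfold Spec_maximo; infer_instance

-- ===== CLAIM (what is proved, stated in full; the proofs are below) =====
def Claim_equal_maximo : Prop := ∀ (instances : List (List Int)), Dom_maximo instances → Pre_maximo instances → Spec_maximo instances (maximo instances)

-- ===== LEMMAS AND PROOFS =====

theorem if_gt_eq_max (m x : Int) : (if x > m then x else m) = max m x := by
  rcases max_cases m x with ⟨h1, h2⟩ | ⟨h1, h2⟩ <;> rw [h1] <;> split <;> omega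

-- the inner loop of A computes the max of column k over all rows, as a foldl over the tail
theorem inner_loop (a : List Int) (l : List (List Int)) (k : Nat) (m0 : Int) :
    (PySem.List.pyRange 0 (((a :: l).length : Int)) 1).foldl (fun m i =>
        if i > 0 then
          (if PySem.List.pyGetD (PySem.List.pyGetD (a :: l) i []) (k : Int) 0 > m then
             PySem.List.pyGetD (PySem.List.pyGetD (a :: l) i []) (k : Int) 0
           else m)
        else PySem.List.pyGetD (PySem.List.pyGetD (a :: l) i []) (k : Int) 0) m0
      = (l.map (fun r => r.getD k 0)).foldl max (a.getD k 0) := by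
  have hpos : (0 : Int) < ((a :: l).length : Int) := by
    simp only [List.length_cons]; positivity
  rw [PySem.List.pyRange_one_cons hpos]
  simp only [List.foldl_cons, zero_add]
  rw [if_neg (by norm_num : ¬ ((0 : Int) > 0)), PySem.List.pyGetD_zero_cons]
  rw [PySem.List.foldl_congr_mem _ _
    (fun m i => max m (PySem.List.pyGetD (PySem.List.pyGetD (a :: l) i ([] : List Int)) (k : Int) 0)) _
    (fun acc x hx => by
      have hx1 : (1 : Int) ≤ x := (PySem.List.mem_pyRange_one.mp hx).1
      rw [if_pos (by omega : x > 0), if_gt_eq_max])]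
  rw [PySem.List.foldl_pyRange_pyGetD' (a :: l) ([] : List Int)
    (fun m r => max m (PySem.List.pyGetD r (k : Int) 0)) _ (by norm_num : (0:Int) ≤ 1)]
  simp only [Int.toNat_one, List.drop_succ_cons, List.drop_zero]
  simp [List.foldl_map, PySem.List.pyGetD_natCast]

-- the append-accumulator outer loop, when the body is independent of the running value
theorem outer_loop (f : Int → Int) (g : Int → Int → Int) :
    ∀ (l : List Int) (m : Int) (acc : List Int), (∀ j ∈ l, ∀ m', g j m' = f j) →
    (l.foldl (fun (st : Int × List Int) j => (g j st.1, st.2 ++ [g j st.1])) (m, acc)).2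
      = acc ++ l.map f := by
  intro l
  induction l with
  | nil => simp
  | cons x xs ih =>
    intro m acc h
    simp only [List.foldl_cons, List.map_cons]
    rw [h x (by simp) m, ih (f x) (acc ++ [f x]) (fun j hj m' => h j (by simp [hj]) m')]
    simp

-- B's row fold, characterized columnwise: folding rows into a length-n accumulator with
-- elementwise max equals, per column j, the scalar max-fold over that column.
theorem row_fold (n : Nat) : ∀ (l : List (List Int)) (acc : List Int), acc.length = n →
    (∀ r ∈ l, n ≤ r.length) →
    l.foldl (fun a r => (a.zip r).map (fun p => if p.1 > p.2 then p.1 else p.2)) acc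
      = (List.range n).map (fun j => (l.map (fun r => r.getD j 0)).foldl max (acc.getD j 0)) := by
  intro l
  induction l with
  | nil =>
    intro acc hlen _
    simp only [List.foldl_nil, List.map_nil]
    apply List.ext_getElem
    · simp [hlen]
    · intro j h1 h2
      simp only [List.getElem_map, List.getElem_range]
      rw [List.getD_eq_getElem _ _ (by omega)]
  | cons r l ih =>
    intro acc hlen hrows
    have hr : n ≤ r.length := hrows r (by simp)
    have hzlen : ((acc.zip r).map (fun p => if p.1 > p.2 then p.1 else p.2)).length = n := by
      simp [List.length_zip, hlen]; omega
    simp only [List.foldl_cons]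
    rw [ih _ hzlen (fun s hs => hrows s (by simp [hs]))]
    apply List.map_congr_left
    intro j hj
    have hjn : j < n := List.mem_range.mp hj
    simp only [List.map_cons, List.foldl_cons]
    congr 1
    rw [List.getD_eq_getElem _ _ (by omega : j < ((acc.zip r).map (fun p => if p.1 > p.2 then p.1 else p.2)).length)]
    simp only [List.getElem_map, List.getElem_zip]
    rw [List.getD_eq_getElem _ _ (by omega : j < acc.length),
        List.getD_eq_getElem _ _ (by omega : j < r.length)]
    exact (if_gt_eq_max _ _).trans (max_comm _ _)

-- ===== VERDICT (by name: the statement is the Claim_ definition above) =====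
theorem maximo_spec : Claim_equal_maximo := by
  intro instances _ hpre
  obtain ⟨hne, hlen⟩ := hpre
  unfold Spec_maximo maximo maximo_alt
  cases instances with
  | nil => exact absurd rfl hne
  | cons a l =>
    simp only [PySem.List.pyGetD_zero_cons, PySem.List.slice_from_one, List.tail_cons]
    cases a with
    | nil =>
      -- length = -1: A's loop is empty; B starts from the empty accumulator, which stays empty
      simp only [List.length_nil, Nat.cast_zero, zero_sub]
      rw [show PySem.List.pyRange 0 (-1) 1 = [] from PySem.List.pyRange_one_eq_nil (by norm_num)]
      rw [PySem.List.slice_to_neg_one]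
      simp only [List.dropLast_nil, List.foldl_nil]
      rw [row_fold 0 l [] rfl (fun r _ => Nat.zero_le _)]
      simp
    | cons x xs =>
      have hL : (((x :: xs).length : Nat) : Int) - 1 = ((xs.length : Nat) : Int) := by
        push_cast [List.length_cons]; ring
      rw [hL, PySem.List.slice_to_natCast, PySem.List.pyRange_one 0 ((xs.length : Nat) : Int)]
      have htake : ((x :: xs).take xs.length).length = xs.length := by
        simp [List.length_take]
      rw [row_fold xs.length l _ htake
        (fun r hr => by simpa using hlen r (by simp [hr]))]
      simp only [sub_zero, Int.toNat_natCast, zero_add]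
      rw [outer_loop (fun j => (l.map (fun r => r.getD j.toNat 0)).foldl max
            (((x :: xs)).getD j.toNat 0))
        (fun j m' => (PySem.List.pyRange 0 ((((x :: xs) :: l).length : Nat) : Int) 1).foldl (fun m i =>
          if i > 0 then
            (if PySem.List.pyGetD (PySem.List.pyGetD ((x :: xs) :: l) i []) j 0 > m then
               PySem.List.pyGetD (PySem.List.pyGetD ((x :: xs) :: l) i []) j 0
             else m)
          else PySem.List.pyGetD (PySem.List.pyGetD ((x :: xs) :: l) i []) j 0) m')
        ((List.range xs.length).map (fun k => ((k : Nat) : Int))) 0 []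
        (fun j hj m' => by
          obtain ⟨k, -, rfl⟩ := List.mem_map.mp hj
          simpa using inner_loop (x :: xs) l k m')]
      simp only [List.nil_append, List.map_map]
      apply List.map_congr_left
      intro k hk
      have hkn : k < xs.length := List.mem_range.mp hk
      simp only [Function.comp, Int.toNat_natCast]
      congr 1
      rw [List.getD_eq_getElem _ _ (by simp; omega),
          List.getD_eq_getElem _ _ (by simp; omega)]
      simp [List.getElem_take]
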